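-- pv_equiv track=rewrite | github.com/michellePhan06/SteganographySite | main.py | bit_positions
-- ===== SOURCE A (Python) =====
-- def bit_positions(start, periods, mode, count):
--     positions = []
--     pos = start
--     for i in range(count):
--         # Determine step size based on mode
--         step = periods[i % len(periods)] if mode == 'cycling' else periods[0]
--         # Move to next embedding position
--         pos += step
--         positions.append(pos)
--     return positions
-- ===== SOURCE B (Python) =====
-- def bit_positions(start, periods, mode, count):
--     if mode == 'cycling':
--         cycle_len = len(periods)
--         # prefix sums of one full cycle of periods
--         cum = []
--         running = 0
--         for p in periods:
--             running += p
--             cum.append(running)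
--         total = cum[-1] if cum else 0
--         # position k = start + (full cycles consumed) * cycle sum + partial-cycle prefix
--         return [start + (k // cycle_len) * total + cum[k % cycle_len]
--                 for k in range(count)]
--     return [start + periods[0] * (k + 1) for k in range(count)]
-- ===== Notes on version B (the rewrite author's own statement) =====
-- stated objective: alternative
-- what changed: A keeps a running position updated once per iteration; B precomputes the prefix sums of one cycle of periods and computes each position independently by the closed form start + (k // len)*cycle_sum + prefix[k % len] (constant-step closed form in non-cycling mode).
import Mathlib
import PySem

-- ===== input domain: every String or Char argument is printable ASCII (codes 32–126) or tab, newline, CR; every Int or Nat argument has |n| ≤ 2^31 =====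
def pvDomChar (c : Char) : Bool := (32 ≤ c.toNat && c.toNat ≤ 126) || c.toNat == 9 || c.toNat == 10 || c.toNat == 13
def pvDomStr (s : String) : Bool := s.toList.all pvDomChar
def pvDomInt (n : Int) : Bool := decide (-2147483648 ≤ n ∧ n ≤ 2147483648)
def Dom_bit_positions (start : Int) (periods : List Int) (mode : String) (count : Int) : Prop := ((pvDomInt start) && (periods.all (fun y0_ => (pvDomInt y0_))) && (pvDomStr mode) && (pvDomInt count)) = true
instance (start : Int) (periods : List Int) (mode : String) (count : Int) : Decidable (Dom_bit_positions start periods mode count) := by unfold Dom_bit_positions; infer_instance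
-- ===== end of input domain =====

-- B replaces A's running-sum loop by a closed form: per-cycle prefix sums plus (k // len)·(cycle sum); alternative algorithm, same cost.

-- ===== PORT A =====
-- literal port of A's loop: state (positions, pos); periods[...] via pyGetD (default
-- never used: Pre_ excludes the out-of-range/zero-division case where Python raises)
def bit_positions (start : Int) (periods : List Int) (mode : String) (count : Int) : List Int :=
  ((PySem.List.pyRange 0 count 1).foldl
    (fun (st : List Int × Int) i =>
      let step := if mode = "cycling"
        then PySem.List.pyGetD periods (PySem.Int.mod i (periods.length : Int)) 0
        else PySem.List.pyGetD periods 0 0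
      let pos := st.2 + step
      (st.1 ++ [pos], pos))
    ([], start)).1

-- ===== PORT B =====
-- port of Source B: build one-cycle prefix sums, then each position by a closed formula
def bit_positions_alt (start : Int) (periods : List Int) (mode : String) (count : Int) : List Int :=
  if mode = "cycling" then
    let cum := (periods.foldl
      (fun (st : List Int × Int) p => let running := st.2 + p; (st.1 ++ [running], running))
      ([], 0)).1
    let total := PySem.List.pyGetD cum (-1) 0   -- cum[-1] if cum else 0 (default only taken when cum = [])
    (PySem.List.pyRange 0 count 1).map (fun k =>
      start + (PySem.Int.floordiv k (periods.length : Int)) * total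
            + PySem.List.pyGetD cum (PySem.Int.mod k (periods.length : Int)) 0)
  else
    (PySem.List.pyRange 0 count 1).map (fun k => start + PySem.List.pyGetD periods 0 0 * (k + 1))

-- ===== PRECONDITION & SPEC =====
-- Pre_ excludes exactly periods = [] with count > 0, where Python A raises
-- (ZeroDivisionError for mode 'cycling', IndexError otherwise).
def Pre_bit_positions (start : Int) (periods : List Int) (mode : String) (count : Int) : Prop :=
  periods ≠ [] ∨ count ≤ 0
instance (start : Int) (periods : List Int) (mode : String) (count : Int) : Decidable (Pre_bit_positions start periods mode count) := by unfold Pre_bit_positions; infer_instance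

def pvWitness_bit_positions : Int × List Int × String × Int := (10, [3, 1, 4], "cycling", 7)

def Spec_bit_positions (start : Int) (periods : List Int) (mode : String) (count : Int) (out : List Int) : Prop := out = bit_positions_alt start periods mode count
instance (start : Int) (periods : List Int) (mode : String) (count : Int) (out : List Int) : Decidable (Spec_bit_positions start periods mode count out) := by unfold Spec_bit_positions; infer_instance

-- ===== CLAIM (what is proved, stated in full; the proofs are below) =====
def Claim_equal_bit_positions : Prop := ∀ (start : Int) (periods : List Int) (mode : String) (count : Int), Dom_bit_positions start periods mode count → Pre_bit_positions start periods mode count → Spec_bit_positions start periods mode count (bit_positions start periods mode count)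

-- ===== LEMMAS AND PROOFS =====

-- characterisation of the prefix-sum loop in B
theorem pvCumSpec (ps : List Int) : ∀ (acc : List Int) (t : Int),
    ps.foldl (fun (st : List Int × Int) p => (st.1 ++ [st.2 + p], st.2 + p)) (acc, t)
      = (acc ++ (List.range ps.length).map (fun j => t + (ps.take (j + 1)).sum), t + ps.sum) := by
  induction ps with
  | nil => intro acc t; simp
  | cons p ps ih =>
      intro acc t
      simp only [List.foldl_cons, ih, List.length_cons, List.range_succ_eq_map,
        List.map_cons, List.map_map, Prod.mk.injEq]
      refine ⟨?_, ?_⟩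
      · simp [Function.comp, List.take_succ_cons, add_assoc]
      · simp [add_assoc]

-- generic running-sum loop vs closed form F, given the defining recurrence of F
theorem pvFoldKey (s F : Nat → Int)
    (hkey : ∀ n : Nat, F n = (if n = 0 then 0 else F (n - 1)) + s n) :
    ∀ (n : Nat) (acc : List Int) (start : Int),
      (List.range n).foldl (fun (st : List Int × Int) k => (st.1 ++ [st.2 + s k], st.2 + s k)) (acc, start)
        = (acc ++ (List.range n).map (fun k => start + F k),
           start + (if n = 0 then 0 else F (n - 1))) := by
  intro n
  induction n with
  | zero => intro acc start; simp
  | succ n ih =>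
      intro acc start
      rw [List.range_succ, List.foldl_append, ih]
      simp only [List.foldl_cons, List.foldl_nil, List.map_append, List.map_cons, List.map_nil,
        Nat.succ_ne_zero, if_false, Nat.add_sub_cancel]
      have h2 : (start + (if n = 0 then 0 else F (n - 1))) + s n = start + F n := by
        rw [hkey n]; ring
      rw [h2]
      simp [List.append_assoc]

-- ===== VERDICT (by name: the statement is the Claim_ definition above) =====
theorem bit_positions_spec : Claim_equal_bit_positions := by
  intro start periods mode count _ hpre
  unfold Spec_bit_positions bit_positions bit_positions_alt
  by_cases hc : count ≤ 0
  · rw [PySem.List.pyRange_one_eq_nil hc]; simp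
  · push_neg at hc
    rcases hpre with hps | hle
    · -- periods ≠ [], 0 < count
      have hL : 0 < periods.length := List.length_pos_of_ne_nil hps
      have hrg := PySem.List.pyRange_one 0 count
      simp only [sub_zero, zero_add] at hrg
      rw [hrg, List.foldl_map]
      simp only [List.map_map]
      -- the prefix-sum list cum of B
      have hcum : (periods.foldl
          (fun (st : List Int × Int) p => (st.1 ++ [st.2 + p], st.2 + p)) ([], 0)).1
          = (List.range periods.length).map (fun j => (periods.take (j + 1)).sum) := by
        rw [pvCumSpec]; simp
      set L := periods.length with hLdef
      set cum := (periods.foldl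
        (fun (st : List Int × Int) p => (st.1 ++ [st.2 + p], st.2 + p)) ([], 0)).1 with hcumdef
      have hcumlen : cum.length = L := by rw [hcum]; simp
      have hcumget : ∀ r : Nat, r < L → cum.getD r 0 = (periods.take (r + 1)).sum := by
        intro r hr
        rw [hcum, List.getD_eq_getElem?_getD]
        simp [List.getElem?_map, List.getElem?_range hr]
      have htk1 : (periods.take 1).sum = periods.getD 0 0 := by
        cases periods with
        | nil => exact absurd rfl hps
        | cons a l => simp
      have htotal : PySem.List.pyGetD cum (-1) 0 = periods.sum := by
        rw [PySem.List.pyGetD_neg_ofNat cum 1 0 (by omega) (by omega)]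
        have h2 := hcumget (cum.length - 1) (by omega)
        rw [List.getD_eq_getElem?_getD, List.getElem?_eq_getElem (by omega)] at h2
        simp only [Option.getD_some] at h2
        rw [h2]
        have htk : periods.take (cum.length - 1 + 1) = periods := by
          apply List.take_of_length_le; omega
        rw [htk]
      by_cases hm : mode = "cycling"
      · simp only [hm, if_true]
        -- key recurrence of the closed form
        have hkey : ∀ n : Nat,
            ((↑(n / L) * periods.sum + cum.getD (n % L) 0 : Int))
              = (if n = 0 then 0
                 else ↑((n - 1) / L) * periods.sum + cum.getD ((n - 1) % L) 0)
                + periods.getD (n % L) 0 := by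
          intro n
          cases n with
          | zero =>
              simp only [Nat.zero_div, Nat.zero_mod, Nat.cast_zero, zero_mul, zero_add]
              rw [hcumget 0 hL, htk1]
              simp
          | succ m =>
              simp only [if_neg (Nat.succ_ne_zero m), Nat.add_sub_cancel]
              have hdm := Nat.div_add_mod m L
              have hmlt : m % L < L := Nat.mod_lt m hL
              by_cases hw : m % L + 1 = L
              · -- wrap-around step
                have hm1 : m + 1 = (m / L + 1) * L := by
                  have hmul : (m / L + 1) * L = L * (m / L) + L := by ring
                  omega
                have hmodd : (m + 1) % L = 0 := by rw [hm1]; exact Nat.mul_mod_left _ _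
                have hdivv : (m + 1) / L = m / L + 1 := by
                  rw [hm1]; exact Nat.mul_div_cancel _ hL
                rw [hmodd, hdivv, hcumget 0 hL, hcumget (m % L) hmlt, htk1]
                have htk : periods.take (m % L + 1) = periods := by
                  apply List.take_of_length_le; omega
                rw [htk]
                push_cast
                ring
              · -- plain step inside a cycle
                have hlt : m % L + 1 < L := by omega
                have hltp : m % L + 1 < periods.length := by omega
                have hm1 : m + 1 = L * (m / L) + (m % L + 1) := by omega
                have hmodd : (m + 1) % L = m % L + 1 := by
                  rw [hm1, Nat.mul_add_mod, Nat.mod_eq_of_lt hlt]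
                have hdivv : (m + 1) / L = m / L := by
                  rw [hm1, Nat.mul_add_div hL, Nat.div_eq_of_lt hlt, Nat.add_zero]
                rw [hmodd, hdivv, hcumget (m % L) hmlt, hcumget (m % L + 1) hlt]
                rw [List.sum_take_succ _ _ hltp]
                have hgd : periods.getD (m % L + 1) 0 = periods[m % L + 1]'hltp := by
                  rw [List.getD_eq_getElem?_getD, List.getElem?_eq_getElem hltp]; simp
                rw [hgd]
                ring
        have hfold :
            (List.range count.toNat).foldl
              (fun (st : List Int × Int) (k : Nat) =>
                (st.1 ++ [st.2 + periods.getD (k % L) 0], st.2 + periods.getD (k % L) 0))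
              ([], start)
            = ([] ++ (List.range count.toNat).map
                 (fun k => start + ((↑(k / L) : Int) * periods.sum + cum.getD (k % L) 0)),
               start + (if count.toNat = 0 then 0
                 else ↑((count.toNat - 1) / L) * periods.sum + cum.getD ((count.toNat - 1) % L) 0)) :=
          pvFoldKey (fun k => periods.getD (k % L) 0)
            (fun k => (↑(k / L) : Int) * periods.sum + cum.getD (k % L) 0) hkey count.toNat [] start
        simp only [Function.comp_def, PySem.Int.mod_natCast, PySem.Int.floordiv_natCast,
          PySem.List.pyGetD_natCast, htotal]
        rw [hfold]
        simp only [List.nil_append]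
        apply List.map_congr_left
        intro k _
        ring
      · -- constant mode
        simp only [if_neg hm]
        have hkey : ∀ n : Nat, (PySem.List.pyGetD periods 0 0 * ((n : Int) + 1))
            = (if n = 0 then 0 else PySem.List.pyGetD periods 0 0 * (((n - 1 : Nat) : Int) + 1))
              + PySem.List.pyGetD periods 0 0 := by
          intro n
          cases n with
          | zero => simp
          | succ m =>
              simp only [if_neg (Nat.succ_ne_zero m), Nat.add_sub_cancel]
              push_cast
              ring
        have hfold :
            (List.range count.toNat).foldl
              (fun (st : List Int × Int) (k : Nat) =>
                (st.1 ++ [st.2 + PySem.List.pyGetD periods 0 0], st.2 + PySem.List.pyGetD periods 0 0))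
              ([], start)
            = ([] ++ (List.range count.toNat).map
                 (fun (k : Nat) => start + PySem.List.pyGetD periods 0 0 * ((k : Int) + 1)),
               start + (if count.toNat = 0 then 0
                 else PySem.List.pyGetD periods 0 0 * (((count.toNat - 1 : Nat) : Int) + 1))) :=
          pvFoldKey (fun _ => PySem.List.pyGetD periods 0 0)
            (fun k => PySem.List.pyGetD periods 0 0 * ((k : Int) + 1)) hkey count.toNat [] start
        simp only [Function.comp_def]
        rw [hfold]
        simp
    · omega
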